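-- pv_equiv track=rewrite | github.com/natalieurban13/ComputerScience-ClassSubmissions | simple_ciphers_natalie-urban.py | grade_message
-- ===== SOURCE A (Python) =====
-- def grade_message(plaintext,known_words):
--
--     case_plaintext = [x.upper() for x in plaintext]
--     case_known_words = [x.upper() for x in known_words]
--     similar_words = 0
--     for x in case_plaintext:
--         for y in case_known_words:
--             if x == y:
--                 similar_words += 1
--     return similar_words
-- ===== SOURCE B (Python) =====
-- def grade_message(plaintext, known_words):
--     p = sorted(x.upper() for x in plaintext)
--     k = sorted(x.upper() for x in known_words)
--     total = 0
--     i = j = 0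
--     while i < len(p) and j < len(k):
--         if p[i] < k[j]:
--             i += 1
--         elif k[j] < p[i]:
--             j += 1
--         else:
--             v = p[i]
--             i2 = i
--             while i2 < len(p) and p[i2] == v:
--                 i2 += 1
--             j2 = j
--             while j2 < len(k) and k[j2] == v:
--                 j2 += 1
--             total += (i2 - i) * (j2 - j)
--             i, j = i2, j2
--     return total
-- ===== Notes on version B (the rewrite author's own statement) =====
-- stated objective: faster
-- what changed: Replaced the nested all-pairs scan with sort-both-lists and a single two-pointer merge pass that adds the product of matching run lengths.
import Mathlib
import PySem

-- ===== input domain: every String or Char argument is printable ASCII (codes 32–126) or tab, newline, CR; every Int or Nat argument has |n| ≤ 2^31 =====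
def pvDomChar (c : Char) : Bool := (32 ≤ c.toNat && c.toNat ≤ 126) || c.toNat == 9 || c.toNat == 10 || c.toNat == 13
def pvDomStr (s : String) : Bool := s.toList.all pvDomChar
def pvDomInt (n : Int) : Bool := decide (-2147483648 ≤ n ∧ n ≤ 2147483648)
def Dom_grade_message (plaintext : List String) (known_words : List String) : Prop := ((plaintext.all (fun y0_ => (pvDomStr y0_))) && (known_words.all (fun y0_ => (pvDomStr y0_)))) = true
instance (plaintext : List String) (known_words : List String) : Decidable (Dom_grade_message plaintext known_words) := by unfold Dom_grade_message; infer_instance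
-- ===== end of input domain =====

-- B replaces A's nested all-pairs scan by sorting both uppercased lists and one
-- two-pointer merge pass adding products of matching run lengths (objective: faster).

-- ===== PORT A =====
def grade_message (plaintext : List String) (known_words : List String) : Int :=
  let case_plaintext := plaintext.map PySem.Str.upper
  let case_known_words := known_words.map PySem.Str.upper
  case_plaintext.foldl
    (fun similar_words x =>
      case_known_words.foldl
        (fun similar_words y => if x == y then similar_words + 1 else similar_words)
        similar_words)
    0

-- ===== PORT B =====
-- the merge pass of Source B: skip the smaller side; on a match measure both runs,
-- add their product and drop both runs (run = head plus its takeWhile tail)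
def pvMergeCount : List String → List String → Int
  | [], _ => 0
  | _ :: _, [] => 0
  | p :: ps, k :: ks =>
    if p < k then pvMergeCount ps (k :: ks)
    else if k < p then pvMergeCount (p :: ps) ks
    else
      let pr := (ps.takeWhile (· == p)).length
      let kr := (ks.takeWhile (· == p)).length
      ((pr + 1 : Int) * (kr + 1 : Int)) +
        pvMergeCount (ps.dropWhile (· == p)) (ks.dropWhile (· == p))
  termination_by p k => p.length + k.length
  decreasing_by
  all_goals simp
  all_goals
    (have h1 := List.length_dropWhile_le (p := (· == p)) (l := ps)
     have h2 := List.length_dropWhile_le (p := (· == p)) (l := ks)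
     omega)

def grade_message_alt (plaintext : List String) (known_words : List String) : Int :=
  let p := PySem.List.sorted (plaintext.map PySem.Str.upper) (fun x => x) false
  let k := PySem.List.sorted (known_words.map PySem.Str.upper) (fun x => x) false
  pvMergeCount p k

-- ===== PRECONDITION & SPEC =====
def Spec_grade_message (plaintext : List String) (known_words : List String) (out : Int) : Prop := out = grade_message_alt plaintext known_words
instance (plaintext : List String) (known_words : List String) (out : Int) : Decidable (Spec_grade_message plaintext known_words out) := by unfold Spec_grade_message; infer_instance

-- ===== CLAIM (what is proved, stated in full; the proofs are below) =====
def Claim_equal_grade_message : Prop := ∀ (plaintext : List String) (known_words : List String), Dom_grade_message plaintext known_words → Spec_grade_message plaintext known_words (grade_message plaintext known_words)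

-- ===== LEMMAS AND PROOFS =====

-- the multiplicity-weighted pair count both programs compute
def pvS (p k : List String) : Int := (p.map (fun x => (k.count x : Int))).sum

theorem pvS_nil (k : List String) : pvS [] k = 0 := rfl

theorem pvS_cons (x : String) (p k : List String) :
    pvS (x :: p) k = (k.count x : Int) + pvS p k := by
  simp [pvS]

theorem pvS_nil_right (p : List String) : pvS p [] = 0 := by
  induction p with
  | nil => rfl
  | cons x xs ih => simp [pvS_cons, ih]

theorem pvS_append_left (p q k : List String) :
    pvS (p ++ q) k = pvS p k + pvS q k := by
  simp [pvS]

theorem pvS_replicate (n : Nat) (v : String) (k : List String) :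
    pvS (List.replicate n v) k = (n : Int) * (k.count v : Int) := by
  simp [pvS, List.map_replicate, List.sum_replicate]

theorem pvS_congr_right (p k k' : List String)
    (h : ∀ x ∈ p, k.count x = k'.count x) : pvS p k = pvS p k' := by
  unfold pvS
  congr 1
  exact List.map_congr_left (fun x hx => by rw [h x hx])

theorem pvS_perm (p p' k k' : List String) (hp : p.Perm p') (hk : k.Perm k') :
    pvS p k = pvS p' k' := by
  unfold pvS
  rw [(hp.map (fun x => (k.count x : Int))).sum_eq]
  congr 1
  exact List.map_congr_left (fun x _ => by rw [hk.count_eq])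

-- A computes pvS of the uppercased lists
theorem grade_message_eq_pvS (P K : List String) :
    grade_message P K = pvS (P.map PySem.Str.upper) (K.map PySem.Str.upper) := by
  unfold grade_message
  generalize P.map PySem.Str.upper = p
  generalize K.map PySem.Str.upper = k
  induction p using List.reverseRecOn with
  | nil => rfl
  | append_singleton xs x ih =>
    rw [List.foldl_append, ih, pvS_append_left]
    simp only [List.foldl_cons, List.foldl_nil]
    have hfun : (fun (acc : Int) y => if x == y then acc + 1 else acc)
        = (fun (acc : Int) y => if y == x then acc + 1 else acc) := by
      funext acc y
      simp only [beq_iff_eq]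
      by_cases h : x = y
      · simp [h]
      · simp [h, Ne.symm h]
    rw [hfun, PySem.List.foldl_beq_add_one, pvS_cons, pvS_nil]
    ring

-- every element of a takeWhile (· == p) block equals p
theorem takeWhile_beq_replicate (p : String) (l : List String) :
    l.takeWhile (· == p) = List.replicate (l.takeWhile (· == p)).length p := by
  apply List.eq_replicate_of_mem
  intro b hb
  have hbp := List.mem_takeWhile_imp hb
  exact eq_of_beq hbp

-- after dropping the leading run of p's from a sorted list bounded below by p,
-- every remaining element is strictly greater than p
theorem pv_lt_of_mem_dropWhile {p : String} {l : List String}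
    (hl : l.Pairwise (· ≤ ·)) (hall : ∀ y ∈ l, p ≤ y) :
    ∀ y ∈ l.dropWhile (· == p), p < y := by
  induction l with
  | nil => simp
  | cons x xs ih =>
    intro y hy
    rw [List.dropWhile_cons] at hy
    rcases List.pairwise_cons.1 hl with ⟨hx, hxs⟩
    by_cases hxp : (x == p) = true
    · rw [if_pos hxp] at hy
      exact ih hxs (fun z hz => hall z (List.mem_cons_of_mem _ hz)) y hy
    · rw [if_neg hxp] at hy
      have hpx : p < x :=
        lt_of_le_of_ne (hall x List.mem_cons_self) (fun h => hxp (by simpa using h.symm))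
      rcases List.mem_cons.1 hy with rfl | hy'
      · exact hpx
      · exact lt_of_lt_of_le hpx (hx y hy')

-- on sorted lists the merge pass computes pvS
theorem pvMergeCount_eq_pvS (p k : List String)
    (hp : p.Pairwise (· ≤ ·)) (hk : k.Pairwise (· ≤ ·)) :
    pvMergeCount p k = pvS p k := by
  suffices H : ∀ n (p k : List String), p.length + k.length ≤ n →
      p.Pairwise (· ≤ ·) → k.Pairwise (· ≤ ·) → pvMergeCount p k = pvS p k from
    H _ p k le_rfl hp hk
  intro n
  induction n with
  | zero =>
    intro p k hlen _ _
    have hp0 : p = [] := List.eq_nil_of_length_eq_zero (by omega)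
    subst hp0
    simp [pvMergeCount, pvS_nil]
  | succ n ih =>
    intro p k hlen hp hk
    cases p with
    | nil => simp [pvMergeCount, pvS_nil]
    | cons x ps =>
      cases k with
      | nil => simp [pvMergeCount, pvS_nil_right]
      | cons y ks =>
        rcases List.pairwise_cons.1 hp with ⟨hxps, hps⟩
        rcases List.pairwise_cons.1 hk with ⟨hyks, hks⟩
        by_cases h1 : x < y
        · rw [pvMergeCount, if_pos h1]
          rw [ih ps (y :: ks) (by simp at hlen ⊢; omega) hps hk]
          have hcount : (y :: ks).count x = 0 := by
            rw [List.count_eq_zero]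
            intro hmem
            rcases List.mem_cons.1 hmem with rfl | hm
            · exact absurd h1 (lt_irrefl x)
            · exact absurd (lt_of_lt_of_le h1 (hyks x hm)) (lt_irrefl x)
          rw [pvS_cons, hcount]
          simp
        · by_cases h2 : y < x
          · rw [pvMergeCount, if_neg h1, if_pos h2]
            rw [ih (x :: ps) ks (by simp at hlen ⊢; omega) hp hks]
            apply pvS_congr_right
            intro z hz
            have hxz : x ≤ z := by
              rcases List.mem_cons.1 hz with rfl | hm
              · exact le_rfl
              · exact hxps z hm
            have hzy : z ≠ y := fun h => absurd (lt_of_lt_of_le h2 (h ▸ hxz)) (lt_irrefl y)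
            simp [Ne.symm hzy]
          · have hxy : x = y := le_antisymm (not_lt.mp h2) (not_lt.mp h1)
            subst hxy
            rw [pvMergeCount, if_neg h1, if_neg h2]
            dsimp only
            have hdP := pv_lt_of_mem_dropWhile hps hxps
            have hdK := pv_lt_of_mem_dropWhile hks hyks
            have hPdec : x :: ps
                = List.replicate ((ps.takeWhile (· == x)).length + 1) x
                    ++ ps.dropWhile (· == x) := by
              rw [List.replicate_succ, List.cons_append, ← takeWhile_beq_replicate,
                  List.takeWhile_append_dropWhile]
            have hKdec : x :: ks
                = List.replicate ((ks.takeWhile (· == x)).length + 1) x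
                    ++ ks.dropWhile (· == x) := by
              rw [List.replicate_succ, List.cons_append, ← takeWhile_beq_replicate,
                  List.takeWhile_append_dropWhile]
            have hcntK0 : (ks.dropWhile (· == x)).count x = 0 := by
              rw [List.count_eq_zero]
              intro hmem
              exact absurd (hdK x hmem) (lt_irrefl x)
            have ihd := ih (ps.dropWhile (· == x)) (ks.dropWhile (· == x))
              (by
                have l1 := List.length_dropWhile_le (p := (· == x)) (l := ps)
                have l2 := List.length_dropWhile_le (p := (· == x)) (l := ks)
                simp at hlen
                omega)
              (hps.sublist (List.dropWhile_sublist _))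
              (hks.sublist (List.dropWhile_sublist _))
            rw [ihd]
            conv_rhs => rw [hPdec, hKdec]
            rw [pvS_append_left, pvS_replicate]
            have hSd : pvS (ps.dropWhile (· == x))
                  (List.replicate ((ks.takeWhile (· == x)).length + 1) x
                    ++ ks.dropWhile (· == x))
                = pvS (ps.dropWhile (· == x)) (ks.dropWhile (· == x)) := by
              apply pvS_congr_right
              intro z hz
              have hzy : z ≠ x := fun h => absurd (h ▸ hdP z hz) (lt_irrefl x)
              simp [List.count_append, List.count_replicate, Ne.symm hzy]
            rw [hSd]
            have hcy : (List.replicate ((ks.takeWhile (· == x)).length + 1) x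
                  ++ ks.dropWhile (· == x)).count x
                = (ks.takeWhile (· == x)).length + 1 := by
              simp [List.count_append, List.count_replicate_self, hcntK0]
            rw [hcy]
            push_cast
            ring

theorem grade_message_alt_eq_pvS (P K : List String) :
    grade_message_alt P K = pvS (P.map PySem.Str.upper) (K.map PySem.Str.upper) := by
  unfold grade_message_alt
  rw [pvMergeCount_eq_pvS _ _
        (PySem.List.sorted_pairwise (xs := P.map PySem.Str.upper) (key := fun x => x))
        (PySem.List.sorted_pairwise (xs := K.map PySem.Str.upper) (key := fun x => x))]
  exact pvS_perm _ _ _ _ (PySem.List.sorted_perm _ _ _) (PySem.List.sorted_perm _ _ _)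

-- ===== VERDICT (by name: the statement is the Claim_ definition above) =====
theorem grade_message_spec : Claim_equal_grade_message := by
  intro P K _
  unfold Spec_grade_message
  rw [grade_message_eq_pvS, grade_message_alt_eq_pvS]
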